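-- pv_equiv track=rewrite | github.com/adamzettelsr/lucky-chatbot | app.py | get_relevant_sections
-- ===== SOURCE A (Python) =====
-- def get_relevant_sections(user_input, knowledge_sections):
--     input_lower = user_input.lower()
--     matches = []
--
--     keywords_map = {
--         "adopt": ["adopt", "adoption", "adoptable", "procedures", "resources", "sanctuary"],
--         "foster": ["foster", "foster-to-adopt"],
--         "training": ["training", "behavior", "classes"],
--         "surrender": ["surrender", "give up", "rehoming"],
--         "lost": ["lost", "missing pet", "found", "microchip"],
--         "snip": ["snip", "spay", "neuter", "clinic"],
--         "volunteer": ["volunteer", "help out", "get involved"],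
--         "events": ["event", "festival", "hawsfest", "hooves", "tails", "flights"],
--         "education": ["education", "camp", "kids", "birthday", "activities", "field trip"],
--         "equine": ["horse", "equine"],
--         "dog park": ["dog park", "run", "play area"],
--         "rescue": ["rescue", "emergency", "team"],
--         "donate": ["donate", "giving", "membership", "planned", "corporate"],
--         "about": ["about", "mission", "history", "leadership", "who we are"],
--         "contact": ["contact", "careers", "report abuse", "news", "email", "phone"],
--         "future": ["future", "planning", "estate"],
--         "safe keep": ["safe keep", "temporary", "safe housing"]
--     }
--
--     for section, text in knowledge_sections.items():
--         for topic, keywords in keywords_map.items():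
--             if any(keyword in input_lower for keyword in keywords):
--                 if topic in section.lower():
--                     matches.append((section, text))
--                     break
--
--     return matches if matches else list(knowledge_sections.items())[:3]
-- ===== SOURCE B (Python) =====
-- KEYWORDS_MAP = {
--     "adopt": ["adopt", "adoption", "adoptable", "procedures", "resources", "sanctuary"],
--     "foster": ["foster", "foster-to-adopt"],
--     "training": ["training", "behavior", "classes"],
--     "surrender": ["surrender", "give up", "rehoming"],
--     "lost": ["lost", "missing pet", "found", "microchip"],
--     "snip": ["snip", "spay", "neuter", "clinic"],
--     "volunteer": ["volunteer", "help out", "get involved"],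
--     "events": ["event", "festival", "hawsfest", "hooves", "tails", "flights"],
--     "education": ["education", "camp", "kids", "birthday", "activities", "field trip"],
--     "equine": ["horse", "equine"],
--     "dog park": ["dog park", "run", "play area"],
--     "rescue": ["rescue", "emergency", "team"],
--     "donate": ["donate", "giving", "membership", "planned", "corporate"],
--     "about": ["about", "mission", "history", "leadership", "who we are"],
--     "contact": ["contact", "careers", "report abuse", "news", "email", "phone"],
--     "future": ["future", "planning", "estate"],
--     "safe keep": ["safe keep", "temporary", "safe housing"]
-- }
--
-- # Flat (keyword, topic) index: each keyword points at its topic, so the input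
-- # is scanned once per keyword instead of once per keyword per section.
-- KEYWORD_TOPIC_PAIRS = [(kw, topic) for topic, kws in KEYWORDS_MAP.items() for kw in kws]
--
--
-- def get_relevant_sections(user_input, knowledge_sections):
--     low = user_input.lower()
--     # Stage 1: one pass over the flat keyword index collects the topics the
--     # input mentions (each topic recorded once).
--     matched = []
--     for kw, topic in KEYWORD_TOPIC_PAIRS:
--         if topic not in matched and kw in low:
--             matched.append(topic)
--     # Stage 2: one pass over the sections keeps those naming a matched topic.
--     chosen = [(section, text) for section, text in knowledge_sections.items()
--               if any(t in section.lower() for t in matched)]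
--     return chosen if chosen else list(knowledge_sections.items())[:3]
-- ===== Notes on version B (the rewrite author's own statement) =====
-- stated objective: faster
-- what changed: B flattens the topic->keywords dict into a (keyword, topic) index, collects the matched topics in one pass over that index, then selects sections in a single comprehension pass, instead of A's nested loop that re-runs every keyword-in-input substring scan for every section.
import Mathlib
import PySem

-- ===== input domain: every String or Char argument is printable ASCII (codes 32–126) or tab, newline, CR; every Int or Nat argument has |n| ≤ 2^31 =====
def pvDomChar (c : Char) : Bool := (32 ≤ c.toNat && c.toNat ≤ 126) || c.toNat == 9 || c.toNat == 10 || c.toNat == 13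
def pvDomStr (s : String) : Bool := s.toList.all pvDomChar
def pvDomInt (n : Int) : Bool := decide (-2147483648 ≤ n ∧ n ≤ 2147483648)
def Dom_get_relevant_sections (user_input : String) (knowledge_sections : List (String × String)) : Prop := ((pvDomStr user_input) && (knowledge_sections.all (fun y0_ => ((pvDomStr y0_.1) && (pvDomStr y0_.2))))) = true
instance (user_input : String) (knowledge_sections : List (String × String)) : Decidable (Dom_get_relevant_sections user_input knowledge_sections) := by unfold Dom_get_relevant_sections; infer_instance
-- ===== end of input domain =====

-- B builds a flat (keyword, topic) index and a matched-topic list in one staged pass, then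
-- selects sections with a single comprehension pass, instead of A's nested per-section
-- re-evaluation of every keyword list (objective: faster; keyword scans over the input are no longer repeated per section).


-- the keywords_map literal (identical constant in both Pythons)
def pvKeywordsMap : List (String × List String) :=
  [ ("adopt", ["adopt", "adoption", "adoptable", "procedures", "resources", "sanctuary"]),
    ("foster", ["foster", "foster-to-adopt"]),
    ("training", ["training", "behavior", "classes"]),
    ("surrender", ["surrender", "give up", "rehoming"]),
    ("lost", ["lost", "missing pet", "found", "microchip"]),
    ("snip", ["snip", "spay", "neuter", "clinic"]),
    ("volunteer", ["volunteer", "help out", "get involved"]),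
    ("events", ["event", "festival", "hawsfest", "hooves", "tails", "flights"]),
    ("education", ["education", "camp", "kids", "birthday", "activities", "field trip"]),
    ("equine", ["horse", "equine"]),
    ("dog park", ["dog park", "run", "play area"]),
    ("rescue", ["rescue", "emergency", "team"]),
    ("donate", ["donate", "giving", "membership", "planned", "corporate"]),
    ("about", ["about", "mission", "history", "leadership", "who we are"]),
    ("contact", ["contact", "careers", "report abuse", "news", "email", "phone"]),
    ("future", ["future", "planning", "estate"]),
    ("safe keep", ["safe keep", "temporary", "safe housing"]) ]

-- ===== PORT A =====
-- A's inner 'for topic, keywords in keywords_map.items(): … break' loop, for one section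
def pvLoopA (input_lower : String) (st : String × String) :
    List (String × List String) → List (String × String) → List (String × String)
  | [], ms => ms
  | (topic, keywords) :: rest, ms =>
    if keywords.any (fun kw => PySem.Str.isIn kw input_lower) then
      if PySem.Str.isIn topic (PySem.Str.lower st.1) then
        ms ++ [st]                       -- append then break
      else pvLoopA input_lower st rest ms
    else pvLoopA input_lower st rest ms

def get_relevant_sections (user_input : String) (knowledge_sections : List (String × String)) : List (String × String) :=
  let input_lower := PySem.Str.lower user_input
  let ms := knowledge_sections.foldl
    (fun ms st => pvLoopA input_lower st pvKeywordsMap ms) []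
  if ms = [] then knowledge_sections.take 3 else ms

-- ===== PORT B =====
-- Source B's KEYWORD_TOPIC_PAIRS comprehension: flatten the map into (keyword, topic) pairs
def pvKeywordTopicPairs : List (String × String) :=
  pvKeywordsMap.flatMap (fun p => p.2.map (fun kw => (kw, p.1)))

-- Source B's stage-1 loop: walk the flat index, recording each input-mentioned topic once
def pvMatchedTopics (low : String) : List (String × String) → List String → List String
  | [], matched => matched
  | (kw, topic) :: rest, matched =>
    if !(matched.contains topic) && PySem.Str.isIn kw low then
      pvMatchedTopics low rest (matched ++ [topic])
    else
      pvMatchedTopics low rest matched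

-- Source B's stage-2 comprehension: keep the sections whose lowered name contains a matched topic
def pvSelect (matched : List String) : List (String × String) → List (String × String)
  | [] => []
  | st :: rest =>
    if matched.any (fun t => PySem.Str.isIn t (PySem.Str.lower st.1)) then
      st :: pvSelect matched rest
    else
      pvSelect matched rest

def get_relevant_sections_alt (user_input : String) (knowledge_sections : List (String × String)) : List (String × String) :=
  let low := PySem.Str.lower user_input
  let chosen := pvSelect (pvMatchedTopics low pvKeywordTopicPairs []) knowledge_sections
  match chosen with
  | [] => knowledge_sections.take 3
  | _ => chosen

-- ===== PRECONDITION & SPEC =====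
def Spec_get_relevant_sections (user_input : String) (knowledge_sections : List (String × String)) (out : List (String × String)) : Prop := out = get_relevant_sections_alt user_input knowledge_sections
instance (user_input : String) (knowledge_sections : List (String × String)) (out : List (String × String)) : Decidable (Spec_get_relevant_sections user_input knowledge_sections out) := by unfold Spec_get_relevant_sections; infer_instance

-- ===== CLAIM (what is proved, stated in full; the proofs are below) =====
def Claim_equal_get_relevant_sections : Prop := ∀ (user_input : String) (knowledge_sections : List (String × String)), Dom_get_relevant_sections user_input knowledge_sections → Spec_get_relevant_sections user_input knowledge_sections (get_relevant_sections user_input knowledge_sections)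

-- ===== LEMMAS AND PROOFS =====

-- A's break-loop over any topic list appends the section exactly once iff some
-- input-matched topic occurs in the lowered section name.
theorem pvLoopA_eq (input_lower : String) (st : String × String)
    (topics : List (String × List String)) (ms : List (String × String)) :
    pvLoopA input_lower st topics ms =
      if topics.any (fun p =>
            p.2.any (fun kw => PySem.Str.isIn kw input_lower) &&
            PySem.Str.isIn p.1 (PySem.Str.lower st.1)) then
        ms ++ [st]
      else ms := by
  induction topics with
  | nil => simp [pvLoopA]
  | cons hd tl ih =>
    obtain ⟨topic, keywords⟩ := hd
    rw [pvLoopA, List.any_cons]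
    by_cases hkw : (keywords.any fun kw => PySem.Str.isIn kw input_lower) = true
    · rw [if_pos hkw]
      by_cases htp : PySem.Str.isIn topic (PySem.Str.lower st.1) = true
      · rw [if_pos htp]
        rw [if_pos]
        show ((_ && _) || _) = true
        rw [hkw, htp]
        rfl
      · rw [if_neg htp, ih]
        have hc : ((keywords.any fun kw => PySem.Str.isIn kw input_lower) &&
            PySem.Str.isIn topic (PySem.Str.lower st.1)) = false := by
          rw [Bool.eq_false_iff.mpr htp, Bool.and_false]
        show _ = if (((topic, keywords).2.any fun kw => PySem.Str.isIn kw input_lower) &&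
            PySem.Str.isIn (topic, keywords).1 (PySem.Str.lower st.1) ||
            tl.any fun p => (p.2.any fun kw => PySem.Str.isIn kw input_lower) &&
              PySem.Str.isIn p.1 (PySem.Str.lower st.1)) = true then ms ++ [st] else ms
        rw [show (((topic, keywords).2.any fun kw => PySem.Str.isIn kw input_lower) &&
            PySem.Str.isIn (topic, keywords).1 (PySem.Str.lower st.1)) = false from hc,
          Bool.false_or]
    · rw [if_neg hkw, ih]
      have hc : ((keywords.any fun kw => PySem.Str.isIn kw input_lower) &&
          PySem.Str.isIn topic (PySem.Str.lower st.1)) = false := by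
        rw [Bool.eq_false_iff.mpr hkw, Bool.false_and]
      show _ = if (((topic, keywords).2.any fun kw => PySem.Str.isIn kw input_lower) &&
          PySem.Str.isIn (topic, keywords).1 (PySem.Str.lower st.1) ||
          tl.any fun p => (p.2.any fun kw => PySem.Str.isIn kw input_lower) &&
            PySem.Str.isIn p.1 (PySem.Str.lower st.1)) = true then ms ++ [st] else ms
      rw [show (((topic, keywords).2.any fun kw => PySem.Str.isIn kw input_lower) &&
          PySem.Str.isIn (topic, keywords).1 (PySem.Str.lower st.1)) = false from hc,
        Bool.false_or]

-- membership in B's stage-1 accumulator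
theorem mem_pvMatchedTopics (low : String) (t : String)
    (pairs : List (String × String)) (acc : List String) :
    t ∈ pvMatchedTopics low pairs acc ↔
      t ∈ acc ∨ ∃ kw, (kw, t) ∈ pairs ∧ PySem.Str.isIn kw low = true := by
  induction pairs generalizing acc with
  | nil => simp [pvMatchedTopics]
  | cons hd tl ih =>
    obtain ⟨kw, topic⟩ := hd
    rw [pvMatchedTopics]
    split_ifs with h
    · have hin : PySem.Str.isIn kw low = true := (Bool.and_eq_true .. ▸ h).2
      rw [ih]
      simp only [List.mem_append, List.mem_cons, Prod.mk.injEq]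
      constructor
      · rintro ((ha | (rfl | h0)) | ⟨k, hk, hkin⟩)
        · exact Or.inl ha
        · exact Or.inr ⟨kw, Or.inl ⟨rfl, rfl⟩, hin⟩
        · cases h0
        · exact Or.inr ⟨k, Or.inr hk, hkin⟩
      · rintro (ha | ⟨k, (⟨rfl, rfl⟩ | hk), hkin⟩)
        · exact Or.inl (Or.inl ha)
        · exact Or.inl (Or.inr (Or.inl rfl))
        · exact Or.inr ⟨k, hk, hkin⟩
    · rw [ih]
      simp only [List.mem_cons, Prod.mk.injEq]
      constructor
      · rintro (ha | ⟨k, hk, hkin⟩)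
        · exact Or.inl ha
        · exact Or.inr ⟨k, Or.inr hk, hkin⟩
      · rintro (ha | ⟨k, (⟨rfl, rfl⟩ | hk), hkin⟩)
        · exact Or.inl ha
        · -- head pair rejected: topic already in acc, or keyword not in low
          rcases Bool.and_eq_false_iff.mp (Bool.eq_false_iff.mpr h) with hc | hc
          · left
            have := Bool.not_eq_true' .. ▸ hc
            simpa [List.contains_eq_mem] using this
          · exact absurd hkin (Bool.eq_false_iff.mp hc)
        · exact Or.inr ⟨k, hk, hkin⟩

-- B's stage-2 comprehension is a filter
theorem pvSelect_eq_filter (matched : List String) (ks : List (String × String)) :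
    pvSelect matched ks =
      ks.filter (fun st => matched.any (fun t => PySem.Str.isIn t (PySem.Str.lower st.1))) := by
  induction ks with
  | nil => simp [pvSelect]
  | cons hd tl ih =>
    rw [pvSelect, List.filter_cons, ih]

-- the two topic collections have the same members
theorem matched_mem_iff (low : String) (t : String) :
    (t ∈ pvMatchedTopics low pvKeywordTopicPairs [] ↔
      ∃ p ∈ pvKeywordsMap, p.1 = t ∧ p.2.any (fun kw => PySem.Str.isIn kw low) = true) := by
  rw [mem_pvMatchedTopics]
  simp only [List.not_mem_nil, false_or, pvKeywordTopicPairs, List.mem_flatMap, List.mem_map,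
    List.any_eq_true, Prod.mk.injEq]
  constructor
  · rintro ⟨kw, ⟨p, hp, k, hk, rfl, rfl⟩, hin⟩
    exact ⟨p, hp, rfl, k, hk, hin⟩
  · rintro ⟨p, hp, rfl, k, hk, hin⟩
    exact ⟨k, ⟨p, hp, k, hk, rfl, rfl⟩, hin⟩

-- hence the per-section predicates agree
theorem pred_eq (low : String) (st : String × String) :
    ((pvMatchedTopics low pvKeywordTopicPairs []).any
        (fun t => PySem.Str.isIn t (PySem.Str.lower st.1)))
      = pvKeywordsMap.any (fun p =>
          p.2.any (fun kw => PySem.Str.isIn kw low) &&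
          PySem.Str.isIn p.1 (PySem.Str.lower st.1)) := by
  rw [Bool.eq_iff_iff]
  simp only [List.any_eq_true, Bool.and_eq_true]
  constructor
  · rintro ⟨t, ht, hin⟩
    obtain ⟨p, hp, rfl, hkw⟩ := (matched_mem_iff low t).mp ht
    exact ⟨p, hp, List.any_eq_true.mp hkw, hin⟩
  · rintro ⟨p, hp, hkw, hin⟩
    exact ⟨p.1, (matched_mem_iff low p.1).mpr ⟨p, hp, rfl, List.any_eq_true.mpr hkw⟩, hin⟩

-- ===== VERDICT (by name: the statement is the Claim_ definition above) =====
theorem get_relevant_sections_spec : Claim_equal_get_relevant_sections := by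
  intro user_input knowledge_sections _
  unfold Spec_get_relevant_sections get_relevant_sections get_relevant_sections_alt
  simp only [pvLoopA_eq, PySem.List.foldl_append_if_eq_filter, List.nil_append,
    pvSelect_eq_filter, pred_eq]
  cases h : knowledge_sections.filter (fun st => pvKeywordsMap.any (fun p =>
      p.2.any (fun kw => PySem.Str.isIn kw (PySem.Str.lower user_input)) &&
      PySem.Str.isIn p.1 (PySem.Str.lower st.1))) <;> simp
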